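-- pv_equiv track=rewrite | github.com/abidkhan484/problem_solving | hackerrank_solution/twin_arrays.py | twinArrays
-- ===== SOURCE A (Python) =====
-- def twinArrays(ar1, ar2):
--     m = len(ar1)
--     n = len(ar2)
--
--     mini = 100001
--     for i in range(m):
--         for j in range(n):
--             if (i != j):
--                 if ((ar1[i]+ar2[j]) < mini):
--                     mini = ar1[i] + ar2[j]
--
--     return mini
-- ===== SOURCE B (Python) =====
-- def twinArrays(ar1, ar2):
--     # one pass over ar2: first-min index jmin, min value m1, min of the rest m2
--     jmin, m1, m2 = -1, None, None
--     for j, v in enumerate(ar2):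
--         if m1 is None or v < m1:
--             jmin, m1, m2 = j, v, m1
--         elif m2 is None or v < m2:
--             m2 = v
--     best = 100001
--     for i, x in enumerate(ar1):
--         y = m2 if i == jmin else m1
--         if y is not None and x + y < best:
--             best = x + y
--     return best
-- ===== Notes on version B (the rewrite author's own statement) =====
-- stated objective: faster
-- what changed: replaces the O(m*n) double loop over all index pairs by one O(n) pass over ar2 that records the first minimum's index, its value and the minimum of the remaining elements, then one O(m) pass over ar1 combining each element with the best ar2 element at a different index
import Mathlib
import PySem

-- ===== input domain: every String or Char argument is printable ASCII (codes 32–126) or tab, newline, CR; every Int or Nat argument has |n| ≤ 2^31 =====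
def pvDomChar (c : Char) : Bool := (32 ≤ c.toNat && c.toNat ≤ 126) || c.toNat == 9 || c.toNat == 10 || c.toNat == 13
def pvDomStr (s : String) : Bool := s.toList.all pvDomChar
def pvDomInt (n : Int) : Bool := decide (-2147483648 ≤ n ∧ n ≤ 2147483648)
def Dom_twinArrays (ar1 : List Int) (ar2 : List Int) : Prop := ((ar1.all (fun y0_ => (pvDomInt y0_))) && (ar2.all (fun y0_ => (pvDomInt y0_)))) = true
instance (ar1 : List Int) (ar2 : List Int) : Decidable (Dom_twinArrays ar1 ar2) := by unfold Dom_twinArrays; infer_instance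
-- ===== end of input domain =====

-- B replaces A's O(m*n) scan of all index pairs by two linear passes: one pass over ar2
-- tracking (first-min index, min, min of the rest), one pass over ar1 combining.

-- ===== PORT A =====
def twinArrays (ar1 : List Int) (ar2 : List Int) : Int :=
  let m : Int := ar1.length
  let n : Int := ar2.length
  (PySem.List.pyRange 0 m 1).foldl (fun mini i =>
    (PySem.List.pyRange 0 n 1).foldl (fun mini j =>
      if i ≠ j then
        if PySem.List.pyGetD ar1 i 0 + PySem.List.pyGetD ar2 j 0 < mini then
          PySem.List.pyGetD ar1 i 0 + PySem.List.pyGetD ar2 j 0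
        else mini
      else mini) mini) 100001

-- ===== PORT B =====
-- one step of B's first loop: state (jmin, m1, m2), next pair (j, v)
def twinStep (s : Int × Option Int × Option Int) (p : Int × Int) : Int × Option Int × Option Int :=
  match s, p with
  | (jm, m1, m2), (j, v) =>
    match m1 with
    | none => (j, some v, m1)
    | some a =>
      if v < a then (j, some v, m1)
      else
        match m2 with
        | none => (jm, m1, some v)
        | some b => if v < b then (jm, m1, some v) else (jm, m1, m2)

def twinArrays_alt (ar1 : List Int) (ar2 : List Int) : Int :=
  match (PySem.List.enumerate ar2 0).foldl twinStep (-1, none, none) with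
  | (jm, m1, m2) =>
    (PySem.List.enumerate ar1 0).foldl (fun best p =>
      match (if p.1 == jm then m2 else m1) with
      | none => best
      | some y => if p.2 + y < best then p.2 + y else best) 100001

-- ===== PRECONDITION & SPEC =====
def Spec_twinArrays (ar1 : List Int) (ar2 : List Int) (out : Int) : Prop := out = twinArrays_alt ar1 ar2
instance (ar1 : List Int) (ar2 : List Int) (out : Int) : Decidable (Spec_twinArrays ar1 ar2 out) := by unfold Spec_twinArrays; infer_instance

-- ===== CLAIM (what is proved, stated in full; the proofs are below) =====
def Claim_equal_twinArrays : Prop := ∀ (ar1 : List Int) (ar2 : List Int), Dom_twinArrays ar1 ar2 → Spec_twinArrays ar1 ar2 (twinArrays ar1 ar2)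

-- ===== LEMMAS AND PROOFS =====

-- optional minimum of a list, as a left fold
def mcomb : Option Int → Int → Int
  | none, v => v
  | some a, v => min a v

def omin (l : List Int) : Option Int := l.foldl (fun o v => some (mcomb o v)) none

def mfold (acc : Int) : Option Int → Int
  | none => acc
  | some r => min acc r

theorem foldl_omin_some (t : List Int) : ∀ x : Int,
    t.foldl (fun o v => some (mcomb o v)) (some x) = some (t.foldl min x) := by
  induction t with
  | nil => intro x; rfl
  | cons h t ih => intro x; simp only [List.foldl_cons]; exact ih (min x h)

theorem omin_nil : omin [] = none := rfl

theorem omin_cons (x : Int) (t : List Int) : omin (x :: t) = some (t.foldl min x) :=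
  foldl_omin_some t x

theorem omin_eq_none_iff (l : List Int) : omin l = none ↔ l = [] := by
  cases l <;> simp [omin_nil, omin_cons]

theorem foldl_min_init (t : List Int) : ∀ a x : Int, min a (t.foldl min x) = t.foldl min (min a x) := by
  induction t with
  | nil => intro a x; rfl
  | cons h t ih =>
    intro a x
    simp only [List.foldl_cons]
    rw [ih a (min x h), min_assoc]

theorem mfold_omin (l : List Int) (acc : Int) : mfold acc (omin l) = l.foldl min acc := by
  cases l with
  | nil => rfl
  | cons x t => rw [omin_cons]; simp only [mfold, List.foldl_cons]; rw [foldl_min_init]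

theorem foldl_min_le_init (t : List Int) : ∀ x : Int, t.foldl min x ≤ x := by
  induction t with
  | nil => intro x; exact le_refl x
  | cons h t ih =>
    intro x
    simp only [List.foldl_cons]
    exact le_trans (ih (min x h)) (min_le_left x h)

theorem foldl_min_le_mem (t : List Int) : ∀ x y : Int, y ∈ t → t.foldl min x ≤ y := by
  induction t with
  | nil => intro x y hy; simp at hy
  | cons h t ih =>
    intro x y hy
    rcases List.mem_cons.mp hy with rfl | hy
    · exact le_trans (foldl_min_le_init t (min x y)) (min_le_right x y)
    · exact ih (min x h) y hy

theorem foldl_min_mem (t : List Int) : ∀ x : Int, t.foldl min x = x ∨ t.foldl min x ∈ t := by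
  induction t with
  | nil => intro x; exact Or.inl rfl
  | cons h t ih =>
    intro x
    rcases ih (min x h) with he | hm
    · rw [List.foldl_cons, he]
      rcases min_choice x h with h1 | h1
      · exact Or.inl h1
      · exact Or.inr (by rw [h1]; exact List.mem_cons_self)
    · exact Or.inr (List.mem_cons_of_mem h hm)

theorem omin_isMin {l : List Int} {a : Int} (h : omin l = some a) :
    a ∈ l ∧ ∀ x ∈ l, a ≤ x := by
  cases l with
  | nil => simp [omin_nil] at h
  | cons x t =>
    rw [omin_cons] at h
    injection h with h
    constructor
    · rcases foldl_min_mem t x with he | hm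
      · rw [← h, he]; exact List.mem_cons_self
      · rw [← h]; exact List.mem_cons_of_mem x hm
    · intro y hy
      rcases List.mem_cons.mp hy with rfl | hy
      · rw [← h]; exact foldl_min_le_init t y
      · rw [← h]; exact foldl_min_le_mem t x y hy

theorem omin_eq_some_iff (l : List Int) (a : Int) :
    omin l = some a ↔ (a ∈ l ∧ ∀ x ∈ l, a ≤ x) := by
  constructor
  · exact omin_isMin
  · rintro ⟨hmem, hle⟩
    cases hl : omin l with
    | none => rw [omin_eq_none_iff] at hl; subst hl; simp at hmem
    | some b =>
      rcases omin_isMin hl with ⟨hbm, hbl⟩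
      have := le_antisymm (hle b hbm) (hbl a hmem)
      rw [this]

theorem omin_congr_mem {l l' : List Int} (h : ∀ x, x ∈ l ↔ x ∈ l') : omin l = omin l' := by
  cases hl : omin l with
  | none =>
    rw [omin_eq_none_iff] at hl; subst hl
    symm; rw [omin_eq_none_iff]
    cases hl' : l' with
    | nil => rfl
    | cons y t => exfalso; have := (h y).mpr (by rw [hl']; exact List.mem_cons_self); simp at this
  | some a =>
    rcases omin_isMin hl with ⟨hmem, hle⟩
    symm
    rw [omin_eq_some_iff]
    exact ⟨(h a).mp hmem, fun x hx => hle x ((h x).mpr hx)⟩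

theorem omin_append_singleton (l : List Int) (v : Int) :
    omin (l ++ [v]) = some (mcomb (omin l) v) := by
  simp [omin, List.foldl_append]

theorem foldl_min_map_add (c : Int) (t : List Int) : ∀ x : Int,
    (t.map (fun y => c + y)).foldl min (c + x) = c + t.foldl min x := by
  induction t with
  | nil => intro x; rfl
  | cons h t ih =>
    intro x
    simp only [List.map_cons, List.foldl_cons]
    rw [show min (c + x) (c + h) = c + min x h by omega, ih]

theorem omin_map_add (c : Int) (l : List Int) :
    omin (l.map (fun y => c + y)) = (omin l).map (fun y => c + y) := by
  cases l with
  | nil => rfl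
  | cons x t => rw [List.map_cons, omin_cons, omin_cons, foldl_min_map_add]; rfl

-- the values of ar2 at indices different from i
def rowlist (ar2 : List Int) (i : Int) : List Int :=
  ((PySem.List.pyRange 0 ar2.length 1).filter (fun j => decide (¬ i = j))).map
    (fun j => PySem.List.pyGetD ar2 j 0)

theorem mem_rowlist (ar2 : List Int) (i x : Int) :
    x ∈ rowlist ar2 i ↔ ∃ k : Nat, ∃ h : k < ar2.length, (k : Int) ≠ i ∧ ar2[k] = x := by
  simp only [rowlist, List.mem_map, List.mem_filter, PySem.List.mem_pyRange_one]
  constructor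
  · rintro ⟨j, ⟨⟨hj0, hjn⟩, hne⟩, hval⟩
    refine ⟨j.toNat, by omega, by simp at hne; omega, ?_⟩
    rw [← hval, PySem.List.pyGetD_eq_getElem ar2 0 hj0 (by exact_mod_cast hjn)]
  · rintro ⟨k, hk, hne, hval⟩
    refine ⟨(k : Int), ⟨⟨by omega, by exact_mod_cast hk⟩, by simp; omega⟩, ?_⟩
    rw [PySem.List.pyGetD_eq_getElem ar2 0 (by omega) (by exact_mod_cast hk)]
    simpa using hval

-- loop invariant for B's first pass over ar2
def TwinInv (pre : List Int) (s : Int × Option Int × Option Int) : Prop :=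
  s.2.1 = omin pre ∧
  ((pre = [] ∧ s.1 = -1 ∧ s.2.2 = none) ∨
   (∃ j : Nat, s.1 = (j : Int) ∧ j < pre.length ∧ pre[j]? = s.2.1 ∧ s.2.2 = omin (pre.eraseIdx j)))

theorem inv_step (pre : List Int) (s : Int × Option Int × Option Int) (v : Int)
    (h : TwinInv pre s) : TwinInv (pre ++ [v]) (twinStep s ((pre.length : Int), v)) := by
  obtain ⟨jm, m1, m2⟩ := s
  obtain ⟨h1, h2⟩ := h
  simp only at h1 h2
  cases m1 with
  | none =>
    -- pre is empty
    have hpre : pre = [] := (omin_eq_none_iff pre).mp h1.symm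
    subst hpre
    rcases h2 with ⟨-, rfl, rfl⟩ | ⟨j, -, hj, -, -⟩
    · refine ⟨by simp [twinStep, omin_cons], Or.inr ⟨0, ?_⟩⟩
      simp [twinStep, omin_nil]
    · simp at hj
  | some a =>
    have hpre : pre ≠ [] := by
      intro hcon; rw [hcon] at h1; simp [omin_nil] at h1
    rcases h2 with ⟨hcon, -, -⟩ | ⟨j, rfl, hj, hgj, hm2⟩
    · exact absurd hcon hpre
    by_cases hv : v < a
    · -- new minimum at the appended position
      refine ⟨?_, Or.inr ⟨pre.length, ?_⟩⟩
      · simp only [twinStep, if_pos hv]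
        rw [omin_append_singleton, ← h1]
        simp [mcomb]; omega
      · simp only [twinStep, if_pos hv]
        refine ⟨by simp, by simp, ?_, ?_⟩
        · simp
        · rw [List.eraseIdx_append_of_length_le (le_refl pre.length)]
          simp [← h1]
    · -- old minimum survives
      have hbody : twinStep ((j : Int), some a, m2) ((pre.length : Int), v) =
          ((j : Int), some a, some (mcomb m2 v)) := by
        cases m2 with
        | none => simp [twinStep, if_neg hv, mcomb]
        | some b =>
          by_cases hb : v < b
          · simp [twinStep, if_neg hv, if_pos hb, mcomb]; omega
          · simp [twinStep, if_neg hv, if_neg hb, mcomb]; omega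
      rw [hbody]
      refine ⟨?_, Or.inr ⟨j, rfl, ?_, ?_, ?_⟩⟩
      · rw [omin_append_singleton, ← h1, mcomb]
        simp; omega
      · simp; omega
      · rw [List.getElem?_append_left hj]; exact hgj
      · rw [List.eraseIdx_append_of_lt_length hj, omin_append_singleton, ← hm2]

theorem inv_final (l : List Int) :
    TwinInv l ((PySem.List.enumerate l 0).foldl twinStep (-1, none, none)) := by
  induction l using List.reverseRecOn with
  | nil => exact ⟨rfl, Or.inl ⟨rfl, rfl, rfl⟩⟩
  | append_singleton t v ih =>
    rw [PySem.List.enumerate_append, List.foldl_append]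
    have : PySem.List.enumerate [v] (0 + (t.length : Int)) = [((t.length : Int), v)] := by
      simp [PySem.List.enumerate_cons, PySem.List.enumerate_nil]
    rw [this, List.foldl_cons, List.foldl_nil]
    exact inv_step t _ v ih

-- the selected candidate equals the row minimum, for every i
theorem select_eq_rowmin (ar2 : List Int) (jm : Int) (m1 m2 : Option Int)
    (hinv : TwinInv ar2 (jm, m1, m2)) (i : Int) :
    (if i = jm then m2 else m1) = omin (rowlist ar2 i) := by
  obtain ⟨h1, h2⟩ := hinv
  simp only at h1 h2 ⊢
  rcases h2 with ⟨rfl, rfl, rfl⟩ | ⟨j, rfl, hj, hgj, hm2⟩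
  · -- ar2 = []
    have : rowlist [] i = [] := by simp [rowlist]
    rw [this, omin_nil]
    split
    · rfl
    · exact h1
  · by_cases hij : i = (j : Int)
    · -- i is the first-min index: the candidate is the min of the rest
      rw [if_pos hij, hm2]
      apply omin_congr_mem
      intro x
      rw [mem_rowlist, List.mem_eraseIdx_iff_getElem]
      constructor
      · rintro ⟨k, hk, hne, hval⟩
        exact ⟨k, hk, by omega, hval⟩
      · rintro ⟨k, hk, hne, hval⟩
        exact ⟨k, hk, by omega, hval⟩
    · -- i is not the first-min index: the candidate is the global min
      rw [if_neg hij, h1]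
      cases hm1 : omin ar2 with
      | none => rw [omin_eq_none_iff] at hm1; subst hm1; simp at hj
      | some a =>
        rcases omin_isMin hm1 with ⟨-, hle⟩
        have hga : ar2[j] = a := by
          rw [h1, hm1] at hgj
          rw [List.getElem?_eq_getElem hj] at hgj
          injection hgj
        symm
        rw [omin_eq_some_iff]
        constructor
        · rw [mem_rowlist]
          exact ⟨j, hj, by omega, hga⟩
        · intro x hx
          rw [mem_rowlist] at hx
          obtain ⟨k, hk, -, hval⟩ := hx
          exact hval ▸ hle _ (List.getElem_mem hk)

-- A's inner loop computes a conditional running minimum over the filtered row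
theorem foldl_if_min (p : Int → Prop) [DecidablePred p] (f : Int → Int) (l : List Int) :
    ∀ acc : Int,
      l.foldl (fun a x => if p x then (if f x < a then f x else a) else a) acc =
      ((l.filter (fun x => decide (p x))).map f).foldl min acc := by
  induction l with
  | nil => intro acc; rfl
  | cons h t ih =>
    intro acc
    by_cases hp : p h
    · rw [List.foldl_cons, if_pos hp, ih, List.filter_cons_of_pos (by simpa using hp),
        List.map_cons, List.foldl_cons,
        show (if f h < acc then f h else acc) = min acc (f h) by omega]
    · rw [List.foldl_cons, if_neg hp, ih, List.filter_cons_of_neg (by simpa using hp)]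

theorem rowlist_map (ar1 ar2 : List Int) (i : Int) :
    ((PySem.List.pyRange 0 (ar2.length : Int) 1).filter (fun j => decide (¬ i = j))).map
      (fun j => PySem.List.pyGetD ar1 i 0 + PySem.List.pyGetD ar2 j 0) =
    (rowlist ar2 i).map (fun y => PySem.List.pyGetD ar1 i 0 + y) := by
  simp [rowlist, List.map_map, Function.comp]

-- ===== VERDICT (by name: the statement is the Claim_ definition above) =====
theorem twinArrays_spec : Claim_equal_twinArrays := by
  intro ar1 ar2 _
  simp only [Spec_twinArrays, twinArrays, twinArrays_alt]
  rcases hs : (PySem.List.enumerate ar2 0).foldl twinStep (-1, none, none) with ⟨jm, m1, m2⟩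
  have hinv := inv_final ar2
  rw [hs] at hinv
  -- rewrite B's second loop as a fold over pyRange 0 (len ar1)
  rw [PySem.List.enumerate_eq_map_pyRange (d := 0), List.foldl_map]
  -- both sides are folds over pyRange 0 (len ar1) 1; show the bodies agree
  congr 1
  funext acc i
  have hkey : (if i = jm then m2 else m1) = omin (rowlist ar2 i) :=
    select_eq_rowmin ar2 jm m1 m2 hinv i
  have hA : (PySem.List.pyRange 0 (ar2.length : Int) 1).foldl (fun mini j =>
      if i ≠ j then
        if PySem.List.pyGetD ar1 i 0 + PySem.List.pyGetD ar2 j 0 < mini then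
          PySem.List.pyGetD ar1 i 0 + PySem.List.pyGetD ar2 j 0
        else mini
      else mini) acc =
      mfold acc ((omin (rowlist ar2 i)).map (fun y => PySem.List.pyGetD ar1 i 0 + y)) := by
    rw [foldl_if_min (fun j => ¬ i = j) (fun j => PySem.List.pyGetD ar1 i 0 + PySem.List.pyGetD ar2 j 0),
      rowlist_map, ← omin_map_add, mfold_omin]
  rw [hA, ← hkey]
  simp only [beq_iff_eq]
  cases hm : (if i = jm then m2 else m1) with
  | none => rfl
  | some y =>
    simp only [Option.map_some, mfold]
    omega
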